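-- pv_equiv track=rewrite | github.com/MikhayEeer/EvolveTerm | src/llm2stage-invariant/pipeline.py | _has_unary_deref
-- ===== SOURCE A (Python) =====
-- def _has_unary_deref(expr: str) -> bool:
--     i = 0
--     length = len(expr)
--     while i < length:
--         if expr[i] != "*":
--             i += 1
--             continue
--         prev = i - 1
--         while prev >= 0 and expr[prev].isspace():
--             prev -= 1
--         if prev < 0:
--             return True
--         if expr[prev] in "([=,+-*/%<>&|!^~?:;":
--             return True
--         i += 1
--     return False
-- ===== SOURCE B (Python) =====
-- _UNARY_PREV = "([=,+-*/%<>&|!^~?:;"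
--
-- def _has_unary_deref(expr: str) -> bool:
--     last = None  # most recent non-whitespace character seen so far
--     for c in expr:
--         if c == "*" and (last is None or last in _UNARY_PREV):
--             return True
--         if not c.isspace():
--             last = c
--     return False
-- ===== Notes on version B (the rewrite author's own statement) =====
-- stated objective: simpler
-- what changed: Single forward pass carrying the last non-whitespace character seen, instead of an index loop with an inner backward whitespace-skipping scan at each asterisk.
import Mathlib
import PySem

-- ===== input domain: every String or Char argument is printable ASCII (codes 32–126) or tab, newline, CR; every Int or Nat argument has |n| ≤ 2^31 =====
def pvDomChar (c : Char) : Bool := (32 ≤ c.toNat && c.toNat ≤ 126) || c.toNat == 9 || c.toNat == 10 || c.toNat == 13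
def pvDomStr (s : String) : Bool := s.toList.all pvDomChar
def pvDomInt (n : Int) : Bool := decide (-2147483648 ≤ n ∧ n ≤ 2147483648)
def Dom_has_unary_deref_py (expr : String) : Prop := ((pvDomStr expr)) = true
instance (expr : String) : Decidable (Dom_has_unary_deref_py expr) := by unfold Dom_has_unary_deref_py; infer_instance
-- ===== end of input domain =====

-- B replaces A's index loop with inner backward whitespace scan by one forward pass
-- carrying the last non-whitespace character seen (simpler single-loop decomposition).

-- the operator string "([=,+-*/%<>&|!^~?:;" shared by both sources
def pvOps : List Char := "([=,+-*/%<>&|!^~?:;".toList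

-- ===== PORT A =====
-- the inner `while prev >= 0 and expr[prev].isspace(): prev -= 1` loop, then the
-- `prev < 0` / `expr[prev]` inspection; argument is (python prev)+1, 0 meaning prev < 0
def pvABack (l : List Char) : Nat → Option Char
  | 0 => none
  | p + 1 => if PySem.Chars.isspace (l.getD p ' ') then pvABack l p else some (l.getD p ' ')

-- the outer `while i < length` loop; fuel = length - i, indices stay in range
def pvALoop (l : List Char) (i : Nat) : Nat → Bool
  | 0 => false
  | f + 1 =>
    if l.getD i ' ' ≠ '*' then pvALoop l (i + 1) f
    else
      match pvABack l i with
      | none => true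
      | some c => if c ∈ pvOps then true else pvALoop l (i + 1) f

def has_unary_deref_py (expr : String) : Bool :=
  pvALoop expr.toList 0 expr.toList.length

-- ===== PORT B =====
-- single forward pass; `last` = most recent non-whitespace character seen so far
def pvBLoop (last : Option Char) : List Char → Bool
  | [] => false
  | c :: cs =>
    if c = '*' && (last.isNone || last.any (· ∈ pvOps)) then true
    else pvBLoop (if PySem.Chars.isspace c then last else some c) cs

def has_unary_deref_py_alt (expr : String) : Bool :=
  pvBLoop none expr.toList

-- ===== PRECONDITION & SPEC =====
def Spec_has_unary_deref_py (expr : String) (out : Bool) : Prop := out = has_unary_deref_py_alt expr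
instance (expr : String) (out : Bool) : Decidable (Spec_has_unary_deref_py expr out) := by unfold Spec_has_unary_deref_py; infer_instance

-- ===== CLAIM (what is proved, stated in full; the proofs are below) =====
def Claim_equal_has_unary_deref_py : Prop := ∀ (expr : String), Dom_has_unary_deref_py expr → Spec_has_unary_deref_py expr (has_unary_deref_py expr)

-- ===== LEMMAS AND PROOFS =====

-- forward characterisation of what the backward scan computes: the last
-- non-whitespace character of the processed prefix
def pvLastNW (p : List Char) : Option Char :=
  p.foldl (fun acc c => if PySem.Chars.isspace c then acc else some c) none

theorem pvLastNW_append (p : List Char) (c : Char) :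
    pvLastNW (p ++ [c]) = if PySem.Chars.isspace c then pvLastNW p else some c := by
  simp [pvLastNW]

theorem pvABack_eq (p : List Char) :
    ∀ rest, pvABack (p ++ rest) p.length = pvLastNW p := by
  induction p using List.reverseRecOn with
  | nil => intro rest; simp [pvABack, pvLastNW]
  | append_singleton q c ih =>
    intro rest
    have hget : (q ++ [c] ++ rest).getD q.length ' ' = c := by
      rw [List.getD_eq_getElem?_getD]
      simp
    simp only [List.length_append, List.length_singleton, pvABack, hget, pvLastNW_append]
    rw [List.append_assoc]
    split
    · simpa using ih (c :: rest)
    · rfl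

theorem pvLoop_eq (rest p : List Char) :
    pvALoop (p ++ rest) p.length rest.length = pvBLoop (pvLastNW p) rest := by
  induction rest generalizing p with
  | nil => simp [pvALoop, pvBLoop]
  | cons c cs ih =>
    have hget : (p ++ c :: cs).getD p.length ' ' = c := by
      rw [List.getD_eq_getElem?_getD]
      simp
    have hstep : ∀ d : Char, pvALoop (p ++ c :: cs) (p.length + 1) cs.length
        = pvBLoop (pvLastNW (p ++ [c])) cs := by
      intro _
      have := ih (p ++ [c])
      simpa using this
    simp only [List.length_cons, pvALoop, pvBLoop, hget]
    by_cases hc : c = '*'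
    · subst hc
      have hback : pvABack (p ++ '*' :: cs) p.length = pvLastNW p := by
        have := pvABack_eq p ('*' :: cs); simpa using this
      simp only [hback, ne_eq, not_true_eq_false, if_false]
      cases hlast : pvLastNW p with
      | none => simp
      | some q =>
        by_cases hq : q ∈ pvOps
        · simp [hq]
        · have hstar : PySem.Chars.isspace '*' = false := by decide
          simp [hq, hstep '*', pvLastNW_append, hstar]
    · have : (l : List Char) → pvBLoop (if PySem.Chars.isspace c then pvLastNW p else some c) l
          = pvBLoop (pvLastNW (p ++ [c])) l := by
        intro l; rw [pvLastNW_append]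
      simp [hc, hstep c, this]

-- ===== VERDICT (by name: the statement is the Claim_ definition above) =====
theorem has_unary_deref_py_spec : Claim_equal_has_unary_deref_py := by
  intro expr _
  unfold Spec_has_unary_deref_py has_unary_deref_py has_unary_deref_py_alt
  have := pvLoop_eq expr.toList []
  simpa [pvLastNW] using this
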